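-- pv_equiv track=rewrite | github.com/Ananta-dot/misr_new | elite_harden.py | covers_open
-- ===== SOURCE A (Python) =====
-- from typing import List, Tuple, Dict
--
-- Rect = Tuple[Tuple[int,int], Tuple[int,int]]  # ((x1,x2),(y1,y2))
--
-- def covers_open(rects: List[Rect], pts):
--     C=[]
--     for (x,y) in pts:
--         S=[]
--         for i,((x1,x2),(y1,y2)) in enumerate(rects):
--             if (x1 < x < x2) and (y1 < y < y2):
--                 S.append(i)
--         C.append(S)
--     return C
-- ===== SOURCE B (Python) =====
-- def covers_open(rects, pts):
--     # x-sweepline: activate a rect when x reaches x1+1, deactivate when x reaches x2;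
--     # visit points in increasing x, answering each stabbing query from the active set.
--     events = []  # (threshold_x, tag, i, y1, y2); tag 1 = activate, 0 = deactivate
--     for i, ((x1, x2), (y1, y2)) in enumerate(rects):
--         if x1 + 1 < x2:  # open x-interval contains an integer
--             events.append((x1 + 1, 1, i, y1, y2))
--             events.append((x2, 0, i, y1, y2))
--     events.sort(key=lambda e: e[0])
--     order = sorted(enumerate(pts), key=lambda jp: jp[1][0])
--     res = [[] for _ in pts]
--     active = set()
--     k = 0
--     for j, (x, y) in order:
--         while k < len(events) and events[k][0] <= x:
--             _, tag, i, y1, y2 = events[k]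
--             if tag == 1:
--                 active.add((i, y1, y2))
--             else:
--                 active.discard((i, y1, y2))
--             k += 1
--         res[j] = sorted(i for i, y1, y2 in active if y1 < y < y2)
--     return res
-- ===== Notes on version B (the rewrite author's own statement) =====
-- stated objective: faster
-- what changed: B replaces A's all-pairs point-by-rect containment scan with an x-sweepline: rect activation/deactivation events and points are sorted by x, one pass maintains the set of x-active rects, and each point's answer is the y-filtered active set with indices re-sorted.
import Mathlib
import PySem

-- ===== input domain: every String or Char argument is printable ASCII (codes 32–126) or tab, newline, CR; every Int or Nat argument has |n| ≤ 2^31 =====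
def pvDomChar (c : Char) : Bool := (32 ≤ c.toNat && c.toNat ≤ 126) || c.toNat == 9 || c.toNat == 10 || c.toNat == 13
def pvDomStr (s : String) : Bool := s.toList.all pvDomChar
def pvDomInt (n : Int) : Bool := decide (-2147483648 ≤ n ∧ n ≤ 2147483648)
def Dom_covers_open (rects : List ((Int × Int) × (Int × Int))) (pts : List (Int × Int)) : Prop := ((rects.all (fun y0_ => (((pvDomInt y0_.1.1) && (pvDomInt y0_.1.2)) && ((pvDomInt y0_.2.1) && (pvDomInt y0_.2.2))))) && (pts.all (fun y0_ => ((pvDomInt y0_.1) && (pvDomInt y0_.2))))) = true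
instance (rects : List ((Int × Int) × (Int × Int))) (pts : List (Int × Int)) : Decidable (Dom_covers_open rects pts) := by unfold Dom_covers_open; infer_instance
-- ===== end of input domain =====

-- B replaces A's all-pairs point×rect scan by an x-sweepline: activation/deactivation
-- events and points are sorted by x, one pass maintains the set of x-active rects, and
-- each point's list is the y-filtered active set, re-sorted; proved equal to A everywhere.

-- ===== PORT A =====
-- point-major: for each point, scan enumerate(rects) accumulating S, append S to C
def covers_open (rects : List ((Int × Int) × (Int × Int))) (pts : List (Int × Int)) : List (List Int) :=
  pts.foldl (fun C p =>
    C ++ [ (PySem.List.enumerate rects).foldl (fun S e =>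
        if e.2.1.1 < p.1 ∧ p.1 < e.2.1.2 ∧ e.2.2.1 < p.2 ∧ p.2 < e.2.2.2
        then S ++ [e.1] else S) [] ]) []

-- ===== PORT B =====
-- events: (threshold_x, tag, i, y1, y2); tag 1 = activate (at x1+1), 0 = deactivate (at x2)
def pvEvents (rects : List ((Int × Int) × (Int × Int))) : List (Int × Int × Int × Int × Int) :=
  (PySem.List.enumerate rects).foldl (fun evs ir =>
    if ir.2.1.1 + 1 < ir.2.1.2 then
      evs ++ [(ir.2.1.1 + 1, 1, ir.1, ir.2.2.1, ir.2.2.2), (ir.2.1.2, 0, ir.1, ir.2.2.1, ir.2.2.2)]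
    else evs) []

-- one event applied to the active set (the body of the while loop)
def pvStep (act : PySem.Set (Int × Int × Int)) (e : Int × Int × Int × Int × Int) : PySem.Set (Int × Int × Int) :=
  if e.2.1 = 1 then PySem.Set.add act (e.2.2.1, e.2.2.2.1, e.2.2.2.2)
  else PySem.Set.discard act (e.2.2.1, e.2.2.2.1, e.2.2.2.2)

-- the while loop: consume events with threshold ≤ x, returning (active, remaining events)
def pvSweep (x : Int) (evs : List (Int × Int × Int × Int × Int)) (act : PySem.Set (Int × Int × Int)) :
    PySem.Set (Int × Int × Int) × List (Int × Int × Int × Int × Int) :=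
  match evs with
  | [] => (act, [])
  | e :: rest => if e.1 ≤ x then pvSweep x rest (pvStep act e) else (act, e :: rest)

def covers_open_alt (rects : List ((Int × Int) × (Int × Int))) (pts : List (Int × Int)) : List (List Int) :=
  let events := PySem.List.sorted (pvEvents rects) (fun e => e.1)
  let order := PySem.List.sorted (PySem.List.enumerate pts) (fun jp => jp.2.1)
  let final := order.foldl (fun st jp =>
      let sw := pvSweep jp.2.1 st.2.2 st.2.1
      (st.1.set jp.1.toNat
         (PySem.List.sorted ((sw.1.filter (fun z => decide (z.2.1 < jp.2.2 ∧ jp.2.2 < z.2.2))).map (fun z => z.1)) (fun v => v)),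
       sw.1, sw.2))
    (pts.map (fun _ => ([] : List Int)), (PySem.Set.empty : PySem.Set (Int × Int × Int)), events)
  final.1

-- ===== PRECONDITION & SPEC =====
def Spec_covers_open (rects : List ((Int × Int) × (Int × Int))) (pts : List (Int × Int)) (out : List (List Int)) : Prop := out = covers_open_alt rects pts
instance (rects : List ((Int × Int) × (Int × Int))) (pts : List (Int × Int)) (out : List (List Int)) : Decidable (Spec_covers_open rects pts out) := by unfold Spec_covers_open; infer_instance

-- ===== CLAIM (what is proved, stated in full; the proofs are below) =====
def Claim_equal_covers_open : Prop := ∀ (rects : List ((Int × Int) × (Int × Int))) (pts : List (Int × Int)), Dom_covers_open rects pts → Spec_covers_open rects pts (covers_open rects pts)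

-- ===== LEMMAS AND PROOFS =====

-- A's answer for one point, as a filter of the enumerated rects
def pvA (rects : List ((Int × Int) × (Int × Int))) (p : Int × Int) : List Int :=
  ((PySem.List.enumerate rects).filter
    (fun e => decide (e.2.1.1 < p.1 ∧ p.1 < e.2.1.2 ∧ e.2.2.1 < p.2 ∧ p.2 < e.2.2.2))).map (fun e => e.1)

-- the set element an event acts on
def pvElem (e : Int × Int × Int × Int × Int) : Int × Int × Int := (e.2.2.1, e.2.2.2.1, e.2.2.2.2)

-- the sorted event list
def pvEv (rects : List ((Int × Int) × (Int × Int))) : List (Int × Int × Int × Int × Int) :=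
  PySem.List.sorted (pvEvents rects) (fun e => e.1)

-- the active set after all events with threshold ≤ x
def pvAS (rects : List ((Int × Int) × (Int × Int))) (x : Int) : PySem.Set (Int × Int × Int) :=
  (List.filter (fun e => decide (e.1 ≤ x)) (pvEv rects)).foldl pvStep PySem.Set.empty

theorem pvA_covers_open (rects : List ((Int × Int) × (Int × Int))) (pts : List (Int × Int)) :
    covers_open rects pts = pts.map (pvA rects) := by
  unfold covers_open pvA
  rw [PySem.List.foldl_append_singleton_eq_map, List.nil_append]
  refine List.map_congr_left ?_
  intro p _
  have := PySem.List.foldl_append_ite (l := PySem.List.enumerate rects) (acc := ([] : List Int))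
    (p := fun e => e.2.1.1 < p.1 ∧ p.1 < e.2.1.2 ∧ e.2.2.1 < p.2 ∧ p.2 < e.2.2.2) (f := fun e => e.1)
  simpa using this

theorem pvEvents_flatMap (rects : List ((Int × Int) × (Int × Int))) :
    pvEvents rects = (PySem.List.enumerate rects).flatMap (fun ir =>
      if ir.2.1.1 + 1 < ir.2.1.2 then
        [(ir.2.1.1 + 1, 1, ir.1, ir.2.2.1, ir.2.2.2), (ir.2.1.2, 0, ir.1, ir.2.2.1, ir.2.2.2)]
      else []) := by
  unfold pvEvents
  rw [PySem.List.foldl_congr_mem (g := fun evs ir => evs ++ (if ir.2.1.1 + 1 < ir.2.1.2 then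
      [(ir.2.1.1 + 1, 1, ir.1, ir.2.2.1, ir.2.2.2), (ir.2.1.2, 0, ir.1, ir.2.2.1, ir.2.2.2)]
      else []))]
  · rw [PySem.List.foldl_append_eq_flatMap, List.nil_append]
  · intro acc x _
    split <;> simp

theorem pvSweep_eq (x : Int) (evs : List (Int × Int × Int × Int × Int)) (act : PySem.Set (Int × Int × Int)) :
    pvSweep x evs act = ((evs.takeWhile (fun e => decide (e.1 ≤ x))).foldl pvStep act,
                         evs.dropWhile (fun e => decide (e.1 ≤ x))) := by
  induction evs generalizing act with
  | nil => simp [pvSweep]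
  | cons e rest ih =>
    by_cases h : e.1 ≤ x
    · simp [pvSweep, h, ih]
    · simp [pvSweep, h]

-- on a list sorted by threshold, takeWhile/dropWhile (≤ x) are filters
theorem pvTakeWhile_eq_filter (l : List (Int × Int × Int × Int × Int)) (x : Int)
    (h : l.Pairwise (fun a b => a.1 ≤ b.1)) :
    l.takeWhile (fun e => decide (e.1 ≤ x)) = l.filter (fun e => decide (e.1 ≤ x)) ∧
    l.dropWhile (fun e => decide (e.1 ≤ x)) = l.filter (fun e => decide (¬ e.1 ≤ x)) := by
  induction l with
  | nil => simp
  | cons e rest ih =>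
    rcases List.pairwise_cons.mp h with ⟨he, hrest⟩
    rcases ih hrest with ⟨h1, h2⟩
    by_cases hx : e.1 ≤ x
    · simp [hx, h1, h2]
    · have hall : ∀ f ∈ rest, ¬ f.1 ≤ x := fun f hf hle => hx (le_trans (he f hf) hle)
      constructor
      · rw [List.takeWhile_cons_of_neg (by simpa using hx), List.filter_cons_of_neg (by simpa using hx)]
        rw [List.filter_eq_nil_iff.mpr (by intro f hf; simpa using hall f hf)]
      · rw [List.dropWhile_cons_of_neg (by simpa using hx), List.filter_cons_of_pos (by simpa using hx)]
        rw [List.filter_eq_self.mpr (by intro f hf; simpa using hall f hf)]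

-- one step of the while-loop body, membership-wise
theorem pvMem_step (act : PySem.Set (Int × Int × Int)) (e : Int × Int × Int × Int × Int) (z : Int × Int × Int) :
    z ∈ pvStep act e ↔ (if pvElem e = z then e.2.1 = 1 else z ∈ act) := by
  unfold pvStep pvElem
  by_cases h : e.2.1 = 1
  · rw [if_pos h]
    rw [PySem.Set.mem_add]
    by_cases hz : (e.2.2.1, e.2.2.2.1, e.2.2.2.2) = z
    · simp [hz, h]
    · simp only [hz, if_false]
      constructor
      · rintro (hm | rfl)
        · exact hm
        · exact absurd rfl hz
      · exact Or.inl
  · rw [if_neg h]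
    rw [PySem.Set.mem_discard]
    by_cases hz : (e.2.2.1, e.2.2.2.1, e.2.2.2.2) = z
    · simp only [hz, if_true]
      constructor
      · rintro ⟨_, hne⟩; exact absurd rfl hne
      · intro h1; exact absurd h1 h
    · simp only [hz, if_false]
      constructor
      · rintro ⟨hm, _⟩; exact hm
      · intro hm; exact ⟨hm, fun h' => hz h'.symm⟩

-- a permutation of a two-element list that is sorted by threshold is that list
theorem pvPermPair (u v a b : Int × Int × Int × Int × Int) (hp : [u, v].Perm [a, b]) :
    [u, v] = [a, b] ∨ [u, v] = [b, a] := by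
  have hu : u ∈ [a, b] := hp.mem_iff.mp (by simp)
  have hv : v ∈ [a, b] := hp.mem_iff.mp (by simp)
  simp only [List.mem_cons, List.not_mem_nil, or_false] at hu hv
  rcases hu with rfl | rfl <;> rcases hv with rfl | rfl
  · by_cases hab : b = v
    · exact Or.inl (by rw [hab])
    · have := hp.count_eq b
      simp [hab, Ne.symm hab] at this
  · exact Or.inl rfl
  · exact Or.inr rfl
  · by_cases hab : a = v
    · exact Or.inl (by rw [hab])
    · have := hp.count_eq a
      simp [hab, Ne.symm hab] at this

-- flatMap over enumerate of a function supported on one index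
theorem pvFlatMap_single {α β : Type} (xs : List α) (s : Int) (g : Int × α → List β) (i : Nat)
    (hi : i < xs.length) (h : ∀ p ∈ PySem.List.enumerate xs s, p.1 ≠ s + (i : Int) → g p = []) :
    (PySem.List.enumerate xs s).flatMap g = g (s + (i : Int), xs[i]) := by
  induction xs generalizing s i with
  | nil => simp at hi
  | cons x xs ih =>
    rw [PySem.List.enumerate_cons, List.flatMap_cons]
    cases i with
    | zero =>
      have hrest : (PySem.List.enumerate xs (s + 1)).flatMap g = [] := by
        refine List.flatMap_eq_nil_iff.mpr ?_
        intro p hp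
        refine h p (List.mem_cons_of_mem _ hp) ?_
        rcases (PySem.List.mem_enumerate_iff _ _ _).mp hp with ⟨k, hk, rfl⟩
        simp only [Nat.cast_zero]
        omega
      simp [hrest]
    | succ k =>
      have hx : g (s, x) = [] := h (s, x) (List.mem_cons_self) (by simp; omega)
      rw [hx, List.nil_append, ih (s + 1) k (by simpa using Nat.lt_of_succ_lt_succ hi)
        (by intro p hp hne
            refine h p (List.mem_cons_of_mem _ hp) ?_
            push_cast
            omega)]
      norm_num
      congr 2
      ring

-- membership after a fold of add/discard steps is decided by the last event touching z
theorem pvMem_foldl_step (l : List (Int × Int × Int × Int × Int)) (act : PySem.Set (Int × Int × Int))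
    (z : Int × Int × Int) :
    (z ∈ l.foldl pvStep act) ↔
      (match (l.filter (fun e => decide (pvElem e = z))).getLast? with
       | none => z ∈ act
       | some e => e.2.1 = 1) := by
  induction l generalizing act with
  | nil => simp
  | cons e rest ih =>
    rw [List.foldl_cons, ih]
    have hsome : ∀ (f : Int × Int × Int × Int × Int) (fs : List (Int × Int × Int × Int × Int)),
        ((match (f :: fs).getLast? with
          | none => z ∈ pvStep act e
          | some g => g.2.1 = 1) ↔
         (match (f :: fs).getLast? with
          | none => z ∈ act
          | some g => g.2.1 = 1)) := by
      intro f fs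
      cases hgl : (f :: fs).getLast? with
      | none => exact absurd (List.getLast?_eq_none_iff.mp hgl) (by simp)
      | some g => simp
    by_cases h : pvElem e = z
    · rw [List.filter_cons_of_pos (by simpa using h)]
      rcases hr : List.filter (fun e => decide (pvElem e = z)) rest with _ | ⟨f, fs⟩
      · simp [List.getLast?, pvMem_step, h]
      · rw [List.getLast?_cons_cons]
        exact hsome f fs
    · rw [List.filter_cons_of_neg (by simpa using h)]
      rcases hr : List.filter (fun e => decide (pvElem e = z)) rest with _ | ⟨f, fs⟩
      · simp [pvMem_step, h]
      · exact hsome f fs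

theorem pvNodup_foldl_step (l : List (Int × Int × Int × Int × Int)) (act : PySem.Set (Int × Int × Int))
    (h : act.Nodup) : (l.foldl pvStep act).Nodup := by
  induction l generalizing act with
  | nil => exact h
  | cons e rest ih =>
    refine ih _ ?_
    unfold pvStep
    split
    · exact PySem.Set.nodup_add _ _ h
    · exact PySem.Set.nodup_discard _ _ h

-- the events touching a given element, inside the sorted event list
theorem pvEv_filter_elem (rects : List ((Int × Int) × (Int × Int))) (i : Nat)
    (h : i < rects.length) (hne : rects[i].1.1 + 1 < rects[i].1.2) :
    (pvEv rects).filter (fun e => decide (pvElem e = ((i : Int), rects[i].2.1, rects[i].2.2))) =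
      [(rects[i].1.1 + 1, 1, (i : Int), rects[i].2.1, rects[i].2.2),
       (rects[i].1.2, 0, (i : Int), rects[i].2.1, rects[i].2.2)] := by
  -- the unsorted event list filtered to this element
  have hg : (pvEvents rects).filter
      (fun e => decide (pvElem e = ((i : Int), rects[i].2.1, rects[i].2.2))) =
      [(rects[i].1.1 + 1, 1, (i : Int), rects[i].2.1, rects[i].2.2),
       (rects[i].1.2, 0, (i : Int), rects[i].2.1, rects[i].2.2)] := by
    rw [pvEvents_flatMap, List.filter_flatMap]
    rw [pvFlatMap_single (i := i) (hi := h)]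
    · simp only [Int.zero_add]
      rw [if_pos hne]
      rw [List.filter_cons_of_pos (by simp [pvElem]), List.filter_cons_of_pos (by simp [pvElem])]
      simp
    · intro p hp hne'
      rcases (PySem.List.mem_enumerate_iff _ _ _).mp hp with ⟨k, hk, rfl⟩
      refine List.filter_eq_nil_iff.mpr ?_
      intro e he
      split at he
      · rcases List.mem_cons.mp he with rfl | he'
        · simp only [pvElem, decide_eq_true_eq]
          intro hz
          exact hne' (by simpa using congrArg Prod.fst hz)
        · rcases List.mem_cons.mp he' with rfl | he''
          · simp only [pvElem, decide_eq_true_eq]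
            intro hz
            exact hne' (by simpa using congrArg Prod.fst hz)
          · simp at he''
      · simp at he
  have hperm : ((pvEv rects).filter
      (fun e => decide (pvElem e = ((i : Int), rects[i].2.1, rects[i].2.2)))).Perm
      [(rects[i].1.1 + 1, 1, (i : Int), rects[i].2.1, rects[i].2.2),
       (rects[i].1.2, 0, (i : Int), rects[i].2.1, rects[i].2.2)] := by
    rw [← hg]
    exact (PySem.List.sorted_perm (pvEvents rects) (fun e => e.1) false).filter _
  have hpw : ((pvEv rects).filter
      (fun e => decide (pvElem e = ((i : Int), rects[i].2.1, rects[i].2.2)))).Pairwise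
      (fun a b => a.1 ≤ b.1) :=
    (PySem.List.sorted_pairwise (pvEvents rects) (fun e => e.1)).filter _
  have hlen := hperm.length_eq
  match hl : (pvEv rects).filter
      (fun e => decide (pvElem e = ((i : Int), rects[i].2.1, rects[i].2.2))), hlen with
  | [u, v], _ =>
    rw [hl] at hperm hpw
    rcases pvPermPair _ _ _ _ hperm with heq | heq
    · exact heq
    · have h1 : u.1 ≤ v.1 := (List.pairwise_cons.mp hpw).1 v (by simp)
      have h2 : u = (rects[i].1.2, 0, (i : Int), rects[i].2.1, rects[i].2.2) := by
        injection heq with e1 e2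
      have h3 : v = (rects[i].1.1 + 1, 1, (i : Int), rects[i].2.1, rects[i].2.2) := by
        injection heq with e1 e2
        injection e2 with e3 e4
      rw [h2, h3] at h1
      simp at h1
      omega

theorem pvEv_filter_elem_nil (rects : List ((Int × Int) × (Int × Int))) (z : Int × Int × Int)
    (h : ¬ ∃ (i : Nat) (_ : i < rects.length),
        z = ((i : Int), rects[i].2.1, rects[i].2.2) ∧ rects[i].1.1 + 1 < rects[i].1.2) :
    (pvEv rects).filter (fun e => decide (pvElem e = z)) = [] := by
  have hg : (pvEvents rects).filter (fun e => decide (pvElem e = z)) = [] := by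
    rw [pvEvents_flatMap, List.filter_flatMap]
    refine List.flatMap_eq_nil_iff.mpr ?_
    intro p hp
    rcases (PySem.List.mem_enumerate_iff _ _ _).mp hp with ⟨k, hk, rfl⟩
    refine List.filter_eq_nil_iff.mpr ?_
    intro e he
    split at he
    · rename_i hdeg
      rcases List.mem_cons.mp he with rfl | he'
      · simp only [pvElem, decide_eq_true_eq, Int.zero_add]
        intro hz
        exact h ⟨k, hk, by simpa using hz.symm, by simpa using hdeg⟩
      · rcases List.mem_cons.mp he' with rfl | he''
        · simp only [pvElem, decide_eq_true_eq, Int.zero_add]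
          intro hz
          exact h ⟨k, hk, by simpa using hz.symm, by simpa using hdeg⟩
        · simp at he''
    · simp at he
  have hperm := (PySem.List.sorted_perm (pvEvents rects) (fun e => e.1) false).filter
    (fun e => decide (pvElem e = z))
  rw [hg] at hperm
  exact hperm.eq_nil

-- membership characterisation of the active set at threshold x
theorem pvMem_AS (rects : List ((Int × Int) × (Int × Int))) (x : Int) (z : Int × Int × Int) :
    z ∈ pvAS rects x ↔ ∃ (i : Nat) (_ : i < rects.length),
      z = ((i : Int), rects[i].2.1, rects[i].2.2) ∧
      rects[i].1.1 < x ∧ x < rects[i].1.2 := by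
  unfold pvAS
  rw [pvMem_foldl_step, List.filter_comm]
  by_cases hex : ∃ (i : Nat) (_ : i < rects.length),
      z = ((i : Int), rects[i].2.1, rects[i].2.2) ∧ rects[i].1.1 + 1 < rects[i].1.2
  · obtain ⟨i, hi, hz, hdeg⟩ := hex
    subst hz
    rw [pvEv_filter_elem rects i hi hdeg]
    have huniq : ∀ (i' : Nat) (hi' : i' < rects.length),
        ((i : Int), rects[i].2.1, rects[i].2.2) = ((i' : Int), rects[i'].2.1, rects[i'].2.2) → i' = i := by
      intro i' hi' he
      have := congrArg Prod.fst he
      simpa using this.symm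
    by_cases c1 : rects[i].1.1 + 1 ≤ x
    · by_cases c2 : rects[i].1.2 ≤ x
      · rw [List.filter_cons_of_pos (by simpa using c1), List.filter_cons_of_pos (by simpa using c2),
            List.filter_nil]
        simp only [List.getLast?_cons_cons, List.getLast?_singleton]
        constructor
        · intro h01; exact absurd h01 (by norm_num)
        · rintro ⟨i', hi', he, _, hlt⟩
          have := huniq i' hi' he
          subst this
          omega
      · rw [List.filter_cons_of_pos (by simpa using c1), List.filter_cons_of_neg (by simpa using c2),
            List.filter_nil]
        simp only [List.getLast?_singleton]
        constructor
        · intro _; exact ⟨i, hi, rfl, by omega, by omega⟩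
        · intro _; trivial
    · have c2 : ¬ rects[i].1.2 ≤ x := by omega
      rw [List.filter_cons_of_neg (by simpa using c1), List.filter_cons_of_neg (by simpa using c2),
          List.filter_nil]
      simp only [List.getLast?_nil]
      constructor
      · intro hz; simp [PySem.Set.empty] at hz
      · rintro ⟨i', hi', he, hgt, _⟩
        have := huniq i' hi' he
        subst this
        omega
  · rw [pvEv_filter_elem_nil rects z hex, List.filter_nil]
    simp only [List.getLast?_nil]
    constructor
    · intro hz; simp [PySem.Set.empty] at hz
    · rintro ⟨i', hi', he, hgt, hlt⟩
      exact absurd ⟨i', hi', he, by omega⟩ hex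

-- the per-point value computed from the active set equals A's per-point list
theorem pvVal_eq (rects : List ((Int × Int) × (Int × Int))) (p : Int × Int) :
    PySem.List.sorted (((pvAS rects p.1).filter
        (fun z => decide (z.2.1 < p.2 ∧ p.2 < z.2.2))).map (fun z => z.1)) (fun v => v) =
      pvA rects p := by
  have hAS : ∀ z, z ∈ pvAS rects p.1 → ∃ (i : Nat) (_ : i < rects.length),
      z = ((i : Int), rects[i].2.1, rects[i].2.2) := by
    intro z hz
    rcases (pvMem_AS rects p.1 z).mp hz with ⟨i, hi, hz, _⟩
    exact ⟨i, hi, hz⟩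
  have hASnodup : (pvAS rects p.1).Nodup := pvNodup_foldl_step _ _ List.nodup_nil
  have hMnodup : (((pvAS rects p.1).filter
      (fun z => decide (z.2.1 < p.2 ∧ p.2 < z.2.2))).map (fun z => z.1)).Nodup := by
    refine List.Nodup.map_on ?_ (hASnodup.filter _)
    intro z hz z' hz' hfst
    rcases hAS z (List.mem_of_mem_filter hz) with ⟨i, hi, rfl⟩
    rcases hAS z' (List.mem_of_mem_filter hz') with ⟨i', hi', rfl⟩
    have : i = i' := by simpa using hfst
    subst this
    rfl
  have hRpw : (pvA rects p).Pairwise (· < ·) := by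
    unfold pvA
    rw [List.pairwise_map]
    exact (PySem.List.pairwise_lt_enumerate rects 0).sublist List.filter_sublist
  have hRnodup : (pvA rects p).Nodup := hRpw.imp ne_of_lt
  refine PySem.List.sorted_eq_of_perm_of_pairwise_lt _ _ _ ?_ hRpw
  refine (List.perm_ext_iff_of_nodup hRnodup hMnodup).mpr ?_
  intro a
  constructor
  · intro ha
    unfold pvA at ha
    rcases List.mem_map.mp ha with ⟨e, he, rfl⟩
    rcases List.mem_filter.mp he with ⟨hmem, hcond⟩
    rcases (PySem.List.mem_enumerate_iff _ _ _).mp hmem with ⟨k, hk, rfl⟩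
    simp only [decide_eq_true_eq] at hcond
    refine List.mem_map.mpr ⟨((k : Int), rects[k].2.1, rects[k].2.2), ?_, by simp⟩
    refine List.mem_filter.mpr ⟨?_, ?_⟩
    · refine (pvMem_AS rects p.1 _).mpr ⟨k, hk, rfl, ?_, ?_⟩
      · simpa using hcond.1
      · simpa using hcond.2.1
    · simp only [decide_eq_true_eq]
      exact ⟨hcond.2.2.1, hcond.2.2.2⟩
  · intro ha
    rcases List.mem_map.mp ha with ⟨z, hz, rfl⟩
    rcases List.mem_filter.mp hz with ⟨hmem, hcond⟩
    rcases (pvMem_AS rects p.1 z).mp hmem with ⟨i, hi, rfl, hx1, hx2⟩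
    simp only [decide_eq_true_eq] at hcond
    unfold pvA
    refine List.mem_map.mpr ⟨((i : Int) + 0, rects[i]), ?_, by simp⟩
    refine List.mem_filter.mpr ⟨?_, ?_⟩
    · exact (PySem.List.mem_enumerate_iff _ _ _).mpr ⟨i, hi, by simp⟩
    · simp only [decide_eq_true_eq]
      exact ⟨by simpa using hx1, by simpa using hx2, hcond.1, hcond.2⟩

-- the body of the main loop, named for the proofs
def pvLoopF (st : List (List Int) × PySem.Set (Int × Int × Int) × List (Int × Int × Int × Int × Int))
    (jp : Int × (Int × Int)) : List (List Int) × PySem.Set (Int × Int × Int) × List (Int × Int × Int × Int × Int) :=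
  let sw := pvSweep jp.2.1 st.2.2 st.2.1
  (st.1.set jp.1.toNat
     (PySem.List.sorted ((sw.1.filter (fun z => decide (z.2.1 < jp.2.2 ∧ jp.2.2 < z.2.2))).map (fun z => z.1)) (fun v => v)),
   sw.1, sw.2)

-- the main loop, under the sweep invariant, acts as a pure per-point write
theorem pvLoop_eq (rects : List ((Int × Int) × (Int × Int)))
    (ord : List (Int × (Int × Int))) (res : List (List Int))
    (act : PySem.Set (Int × Int × Int)) (rem done : List (Int × Int × Int × Int × Int))
    (hsorted : ord.Pairwise (fun a b => a.2.1 ≤ b.2.1))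
    (hsplit : pvEv rects = done ++ rem)
    (hact : act = done.foldl pvStep PySem.Set.empty)
    (hdone : ∀ jp ∈ ord, ∀ e ∈ done, e.1 ≤ jp.2.1) :
    (ord.foldl pvLoopF (res, act, rem)).1
    = ord.foldl (fun r jp => r.set jp.1.toNat (pvA rects jp.2)) res := by
  induction ord generalizing res act rem done with
  | nil => simp
  | cons jp ord' ih =>
    rcases List.pairwise_cons.mp hsorted with ⟨hle, hsorted'⟩
    have hpwEv : (pvEv rects).Pairwise (fun a b => a.1 ≤ b.1) :=
      PySem.List.sorted_pairwise (pvEvents rects) (fun e => e.1)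
    have hpwRem : rem.Pairwise (fun a b => a.1 ≤ b.1) := by
      rw [hsplit] at hpwEv
      exact hpwEv.sublist (List.sublist_append_right _ _)
    obtain ⟨htw, hdw⟩ := pvTakeWhile_eq_filter rem jp.2.1 hpwRem
    have hdonefil : done.filter (fun e => decide (e.1 ≤ jp.2.1)) = done :=
      List.filter_eq_self.mpr (fun e he => by simpa using hdone jp (by simp) e he)
    have hAS : (rem.takeWhile (fun e => decide (e.1 ≤ jp.2.1))).foldl pvStep act = pvAS rects jp.2.1 := by
      rw [htw, hact, ← List.foldl_append]
      unfold pvAS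
      rw [hsplit, List.filter_append, hdonefil]
    have hsplit' : pvEv rects = (done ++ rem.filter (fun e => decide (e.1 ≤ jp.2.1))) ++
        rem.dropWhile (fun e => decide (e.1 ≤ jp.2.1)) := by
      rw [List.append_assoc, ← htw, List.takeWhile_append_dropWhile, hsplit]
    have hstate : pvLoopF (res, act, rem) jp =
        (res.set jp.1.toNat (pvA rects jp.2), pvAS rects jp.2.1,
         rem.dropWhile (fun e => decide (e.1 ≤ jp.2.1))) := by
      unfold pvLoopF
      rw [pvSweep_eq, hAS]
      simp only [pvVal_eq rects jp.2]
    rw [List.foldl_cons, hstate]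
    rw [ih (res.set jp.1.toNat (pvA rects jp.2)) (pvAS rects jp.2.1)
        (rem.dropWhile (fun e => decide (e.1 ≤ jp.2.1)))
        (done ++ rem.filter (fun e => decide (e.1 ≤ jp.2.1)))
        hsorted' hsplit'
        (by rw [List.foldl_append, ← hact, ← htw, hAS])
        (by intro jq hq e he
            rcases List.mem_append.mp he with hd | hf
            · exact hdone jq (List.mem_cons_of_mem _ hq) e hd
            · have h1 : e.1 ≤ jp.2.1 := by simpa using (List.mem_filter.mp hf).2
              exact le_trans h1 (hle jq hq))]
    rw [List.foldl_cons]

-- writing each position once, in any order, is a map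
theorem pvFold_set (pts : List (Int × Int)) (g : Int × Int → List Int)
    (q : List (Int × (Int × Int))) (hq : q.Perm (PySem.List.enumerate pts)) :
    q.foldl (fun r jp => r.set jp.1.toNat (g jp.2)) (pts.map (fun _ => ([] : List Int)))
      = pts.map g := by
  have hq' : ∀ jp ∈ q, ∃ (k : Nat) (_ : k < pts.length), jp = ((k : Int), pts[k]) := by
    intro jp hjp
    rcases (PySem.List.mem_enumerate_iff _ _ _).mp (hq.mem_iff.mp hjp) with ⟨k, hk, rfl⟩
    exact ⟨k, hk, by simp⟩
  have key : ∀ (q' : List (Int × (Int × Int))), (∀ jp ∈ q', ∃ (k : Nat) (_ : k < pts.length), jp = ((k : Int), pts[k])) →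
      ∀ (r : List (List Int)), r.length = pts.length → ∀ (m : Nat),
      (q'.foldl (fun r jp => r.set jp.1.toNat (g jp.2)) r)[m]? =
        if ∃ jp ∈ q', jp.1.toNat = m then (pts.map g)[m]? else r[m]? := by
    intro q'
    induction q' with
    | nil => intro _ r _ m; simp
    | cons jp q' ih =>
      intro hmem r hr m
      rcases hmem jp (by simp) with ⟨k, hk, rfl⟩
      rw [List.foldl_cons]
      rw [ih (fun jp h => hmem jp (List.mem_cons_of_mem _ h)) _ (by simpa using hr) m]
      by_cases hex : ∃ jp ∈ q', jp.1.toNat = m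
      · rw [if_pos hex, if_pos (by rcases hex with ⟨jp', h1, h2⟩; exact ⟨jp', List.mem_cons_of_mem _ h1, h2⟩)]
      · rw [if_neg hex]
        by_cases hm : k = m
        · subst hm
          rw [if_pos ⟨((k : Int), pts[k]), by simp⟩]
          have hkr : k < r.length := by omega
          rw [List.getElem?_set]
          simp [hkr, List.getElem?_eq_getElem hk]
        · rw [if_neg (by
            rintro ⟨jp', hjp', hjm⟩
            rcases List.mem_cons.mp hjp' with rfl | h1
            · exact hm (by simpa using hjm)
            · exact hex ⟨jp', h1, hjm⟩)]
          rw [List.getElem?_set]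
          simp [hm]
  refine List.ext_getElem? ?_
  intro m
  rw [key q hq' _ (by simp) m]
  by_cases hm : m < pts.length
  · rw [if_pos ?_]
    refine ⟨((m : Int), pts[m]), ?_, by simp⟩
    refine hq.mem_iff.mpr ((PySem.List.mem_enumerate_iff _ _ _).mpr ⟨m, hm, by simp⟩)
  · have h1 : pts[m]? = none := List.getElem?_eq_none (by omega)
    split
    · simp [List.getElem?_map, h1]
    · simp [List.getElem?_map, h1]
      omega

-- ===== VERDICT (by name: the statement is the Claim_ definition above) =====
theorem covers_open_spec : Claim_equal_covers_open := by
  intro rects pts _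
  show covers_open rects pts = covers_open_alt rects pts
  rw [pvA_covers_open]
  have hord := PySem.List.sorted_perm (PySem.List.enumerate pts) (fun jp => jp.2.1) false
  have hords := PySem.List.sorted_pairwise (PySem.List.enumerate pts) (fun jp => jp.2.1)
  rw [show covers_open_alt rects pts =
      ((PySem.List.sorted (PySem.List.enumerate pts) (fun jp => jp.2.1)).foldl pvLoopF
        (pts.map (fun _ => ([] : List Int)), (PySem.Set.empty : PySem.Set (Int × Int × Int)), pvEv rects)).1 from rfl]
  rw [pvLoop_eq rects _ _ PySem.Set.empty _ [] hords (by simp) rfl (by simp)]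
  exact (pvFold_set pts (pvA rects) _ hord).symm
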